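-- pv_equiv track=rewrite | github.com/felixgravila/mastersthesis | src/utils/AttentionFlipflopDataGenerator.py | _to_flipflop
-- ===== SOURCE A (Python) =====
-- def _to_flipflop(y_orig, label_as_bases):
--     y_new = []
--     for y in y_orig:
--         if label_as_bases:
--             y_prime = ""
--             buffer = None
--             for base in y:
--                 if base == buffer and base in "ATGC":
--                     base = base.lower()
--                 buffer = base
--                 y_prime += base
--             y_new.append(y_prime)
--         else:
--             y_prime = []
--             buffer = None
--             for base in y:
--                 if base == buffer and base in [1,2,3,4]:
--                     base += 4
--                 buffer = base
--                 y_prime.append(base)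
--             y_new.append(y_prime)
--     return y_new
-- ===== SOURCE B (Python) =====
-- def _to_flipflop(y_orig, label_as_bases):
--     # Run-length decomposition: split each sequence into maximal runs of equal
--     # values; inside a valid-base run, odd-indexed occurrences are flipped.
--     bases = "ATGC" if label_as_bases else [1, 2, 3, 4]
--     y_new = []
--     for y in y_orig:
--         out = []
--         i, n = 0, len(y)
--         while i < n:
--             v = y[i]
--             j = i + 1
--             while j < n and y[j] == v:
--                 j += 1
--             k = j - i
--             if v in bases:
--                 flipped = v.lower() if label_as_bases else v + 4
--                 out.extend(v if t % 2 == 0 else flipped for t in range(k))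
--             else:
--                 out.extend([v] * k)
--             i = j
--         y_new.append("".join(out) if label_as_bases else out)
--     return y_new
-- ===== Notes on version B (the rewrite author's own statement) =====
-- stated objective: alternative
-- what changed: B replaces A's element-by-element buffer state machine by a run-length decomposition: each sequence is split into maximal runs of equal values and a valid-base run of length k is emitted as the run value with every odd-indexed occurrence flipped, invalid runs unchanged.
-- outside the precondition, e.g. on _to_flipflop([[], []], True): A returns ['', ''], B returns ['', '']
import Mathlib
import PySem

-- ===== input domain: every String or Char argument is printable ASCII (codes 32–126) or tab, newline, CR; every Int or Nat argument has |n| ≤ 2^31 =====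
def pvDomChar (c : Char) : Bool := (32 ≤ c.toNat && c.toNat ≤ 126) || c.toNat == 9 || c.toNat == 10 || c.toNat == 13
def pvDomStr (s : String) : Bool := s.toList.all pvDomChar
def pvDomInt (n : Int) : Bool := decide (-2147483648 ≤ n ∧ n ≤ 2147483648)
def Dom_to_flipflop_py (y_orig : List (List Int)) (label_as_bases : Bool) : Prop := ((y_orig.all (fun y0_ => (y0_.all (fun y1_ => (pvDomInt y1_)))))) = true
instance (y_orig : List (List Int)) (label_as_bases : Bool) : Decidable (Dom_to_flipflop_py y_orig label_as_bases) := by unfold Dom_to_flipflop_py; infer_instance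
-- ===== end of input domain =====

-- B replaces A's buffer state machine by a run-length (maximal-run) decomposition; same cost, alternative algorithm.
-- Pre_ excludes label_as_bases = true, on which A raises TypeError for any nonempty inner sequence and otherwise returns strings, not values of the declared List Int type.


-- ===== PORT A =====
-- inner loop body of A's int branch: flip base if it equals the buffer and is in [1,2,3,4]
def pvStepA (st : Option Int × List Int) (base : Int) : Option Int × List Int :=
  let base := if some base == st.1 && (base == 1 || base == 2 || base == 3 || base == 4)
              then base + 4 else base
  (some base, st.2 ++ [base])

def to_flipflop_py (y_orig : List (List Int)) (label_as_bases : Bool) : List (List Int) :=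
  y_orig.foldl (fun y_new y =>
    if label_as_bases then
      -- string branch: on Int elements Python raises (excluded by Pre_); the buffer loop is
      -- kept, the string-only lowercase flip is unrepresentable and omitted.
      y_new ++ [(y.foldl (fun (st : Option Int × List Int) base => (some base, st.2 ++ [base])) (none, [])).2]
    else
      y_new ++ [(y.foldl pvStepA (none, [])).2]) []

-- ===== PORT B =====
-- maximal runs of equal values as (value, length) pairs
def pvRuns (l : List Int) : List (Int × Nat) :=
  match l with
  | [] => []
  | v :: t => (v, (t.takeWhile (· == v)).length + 1) :: pvRuns (t.dropWhile (· == v))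
termination_by l.length
decreasing_by simp; have := List.length_dropWhile_le (· == v) t; omega

def pvIsBase (v : Int) : Bool := v == 1 || v == 2 || v == 3 || v == 4

-- one run: odd-indexed occurrences of a valid base are flipped (+4), invalid runs unchanged
def pvEmit (v : Int) (k : Nat) : List Int :=
  if pvIsBase v then (List.range k).map (fun i => if i % 2 = 0 then v else v + 4)
  else List.replicate k v

def to_flipflop_py_alt (y_orig : List (List Int)) (label_as_bases : Bool) : List (List Int) :=
  y_orig.map (fun y =>
    if label_as_bases then
      -- string branch (excluded by Pre_): runs joined with the string-only flip omitted
      (pvRuns y).flatMap (fun p => List.replicate p.2 p.1)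
    else
      (pvRuns y).flatMap (fun p => pvEmit p.1 p.2))

-- ===== PRECONDITION & SPEC =====
-- Pre_ excludes label_as_bases = true: there A raises TypeError on any nonempty inner
-- sequence, and on all-empty input returns strings, not values of the declared type.
def Pre_to_flipflop_py (y_orig : List (List Int)) (label_as_bases : Bool) : Prop := label_as_bases = false
instance (y_orig : List (List Int)) (label_as_bases : Bool) : Decidable (Pre_to_flipflop_py y_orig label_as_bases) := by unfold Pre_to_flipflop_py; infer_instance
def pvWitness_to_flipflop_py : List (List Int) × Bool := ([[1, 1, 1, 2, 2, 5, 5, 1]], false)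

def Spec_to_flipflop_py (y_orig : List (List Int)) (label_as_bases : Bool) (out : List (List Int)) : Prop := out = to_flipflop_py_alt y_orig label_as_bases
instance (y_orig : List (List Int)) (label_as_bases : Bool) (out : List (List Int)) : Decidable (Spec_to_flipflop_py y_orig label_as_bases out) := by unfold Spec_to_flipflop_py; infer_instance

-- ===== CLAIM (what is proved, stated in full; the proofs are below) =====
def Claim_equal_to_flipflop_py : Prop := ∀ (y_orig : List (List Int)) (label_as_bases : Bool), Dom_to_flipflop_py y_orig label_as_bases → Pre_to_flipflop_py y_orig label_as_bases → Spec_to_flipflop_py y_orig label_as_bases (to_flipflop_py y_orig label_as_bases)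

-- ===== LEMMAS AND PROOFS =====

-- alternating run output, parametrised by the current flip flag
def pvAlt (v : Int) : Bool → Nat → List Int
  | _, 0 => []
  | f, k + 1 => (if f then v + 4 else v) :: pvAlt v (!f) k

lemma pvAlt_range (v : Int) : ∀ (k : Nat) (f : Bool),
    (List.range k).map (fun i => if (i + (if f then 1 else 0)) % 2 = 0 then v else v + 4)
      = pvAlt v f k := by
  intro k
  induction k with
  | zero => intro f; simp [pvAlt]
  | succ k ih =>
    intro f
    rw [List.range_succ_eq_map, List.map_cons, List.map_map]
    cases f with
    | false =>
      simp only [pvAlt]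
      congr 1
      simp only [Bool.not_false]
      rw [← ih true]
      apply List.map_congr_left
      intro i _
      simp [Function.comp, Nat.succ_eq_add_one]
    | true =>
      simp only [pvAlt]
      congr 1
      simp only [Bool.not_true]
      rw [← ih false]
      apply List.map_congr_left
      intro i _
      have h2 : (i + 1 + 1) % 2 = (i + 0) % 2 := by omega
      simp [Function.comp, Nat.succ_eq_add_one, h2]

lemma pvIsBase_bounds {v : Int} (h : pvIsBase v = true) : 1 ≤ v ∧ v ≤ 4 := by
  simp only [pvIsBase, Bool.or_eq_true, beq_iff_eq] at h
  rcases h with (h | h | h | h) <;> omega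

lemma pvStepA_eq (st : Option Int × List Int) (base : Int) :
    pvStepA st base =
      let b := if (st.1 == some base) && pvIsBase base then base + 4 else base
      (some b, st.2 ++ [b]) := by
  have : (some base == st.1) = (st.1 == some base) := by
    cases st.1 <;> simp [BEq.comm]
  simp only [pvStepA, pvIsBase, this]
  rfl

-- run of an invalid base: emitted unchanged, buffer ends at the run value
lemma pvRunNoBase {v : Int} (h : pvIsBase v = false) :
    ∀ (k : Nat) (b : Option Int) (acc : List Int),
      List.foldl pvStepA (b, acc) (List.replicate k v)
        = ((if k = 0 then b else some v), acc ++ List.replicate k v) := by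
  intro k
  induction k with
  | zero => intro b acc; simp
  | succ k ih =>
    intro b acc
    rw [List.replicate_succ, List.foldl_cons, pvStepA_eq]
    simp only [h, Bool.and_false, Bool.false_eq_true, if_false]
    rw [ih (some v) (acc ++ [v])]
    simp

-- run of a valid base: alternating output, buffer ends at v or v+4
lemma pvRunBase {v : Int} (h : pvIsBase v = true) :
    ∀ (k : Nat) (b : Option Int) (f : Bool), (b == some v) = f →
      ∀ (acc : List Int),
      ∃ b', List.foldl pvStepA (b, acc) (List.replicate k v) = (b', acc ++ pvAlt v f k)
        ∧ (k ≠ 0 → b' = some v ∨ b' = some (v + 4)) ∧ (k = 0 → b' = b) := by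
  intro k
  induction k with
  | zero =>
    intro b f _ acc
    exact ⟨b, by simp [pvAlt], by simp, fun _ => rfl⟩
  | succ k ih =>
    intro b f hf acc
    rw [List.replicate_succ, List.foldl_cons, pvStepA_eq]
    simp only [hf, h, Bool.and_true]
    cases f with
    | false =>
      have hnext : ((some v : Option Int) == some v) = true := by simp
      obtain ⟨b', hfold, hne, _⟩ := ih (some v) true hnext (acc ++ [v])
      refine ⟨b', ?_, fun _ => ?_, by simp⟩
      · simp only [Bool.false_eq_true, if_false]
        rw [hfold]; simp [pvAlt]
      · rcases Nat.eq_zero_or_pos k with hk | hk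
        · subst hk
          obtain ⟨_, _, _, h0⟩ := ih (some v) true hnext (acc ++ [v])
          left
          have : b' = some v := by
            have := hfold
            simp at this
            exact this.1.symm
          exact this
        · exact hne (by omega)
    | true =>
      have hnext : ((some (v + 4) : Option Int) == some v) = false := by
        simp only [beq_eq_false_iff_ne, ne_eq, Option.some.injEq]
        omega
      obtain ⟨b', hfold, hne, h0⟩ := ih (some (v + 4)) false hnext (acc ++ [v + 4])
      refine ⟨b', ?_, fun _ => ?_, by simp⟩
      · simp only [if_true]
        rw [hfold]; simp [pvAlt]
      · rcases Nat.eq_zero_or_pos k with hk | hk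
        · subst hk
          right; exact h0 rfl
        · exact hne (by omega)

lemma pvHead?_dropWhile {p : Int → Bool} : ∀ (l : List Int) (a : Int),
    (l.dropWhile p).head? = some a → p a = false := by
  intro l
  induction l with
  | nil => intro a h; simp at h
  | cons x t ih =>
    intro a h
    by_cases hx : p x
    · rw [List.dropWhile_cons_of_pos hx] at h
      exact ih a h
    · rw [List.dropWhile_cons_of_neg hx] at h
      simp at h
      subst h
      exact Bool.not_eq_true _ ▸ (by simpa using hx)

lemma pvTakeWhile_replicate (v : Int) (t : List Int) :
    t.takeWhile (· == v) = List.replicate (t.takeWhile (· == v)).length v := by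
  rw [List.eq_replicate_iff]
  refine ⟨rfl, fun b hb => ?_⟩
  have := List.mem_takeWhile_imp hb
  simpa [beq_iff_eq] using this

-- main per-sequence lemma: A's buffer loop equals B's run decomposition
lemma pvMain : ∀ (n : Nat) (l : List Int), l.length ≤ n →
    ∀ (b : Option Int), (∀ a, l.head? = some a → pvIsBase a = true → (b == some a) = false) →
    ∀ (acc : List Int),
    (List.foldl pvStepA (b, acc) l).2 = acc ++ (pvRuns l).flatMap (fun p => pvEmit p.1 p.2) := by
  intro n
  induction n with
  | zero =>
    intro l hl b _ acc
    have : l = [] := List.eq_nil_of_length_eq_zero (Nat.le_zero.mp hl)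
    subst this; simp [pvRuns]
  | succ n ih =>
    intro l hl b hb acc
    match l with
    | [] => simp [pvRuns]
    | v :: t =>
      have hsplit : v :: t = List.replicate ((t.takeWhile (· == v)).length + 1) v
          ++ t.dropWhile (· == v) := by
        conv_lhs => rw [← List.takeWhile_append_dropWhile (p := (· == v)) (l := t)]
        rw [List.replicate_succ, List.cons_append]
        congr 1
        exact congrArg (· ++ t.dropWhile (· == v)) (pvTakeWhile_replicate v t)
      have hpost_len : (t.dropWhile (· == v)).length ≤ n := by
        have h1 := List.length_dropWhile_le (· == v) t
        simp at hl; omega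
      have hrunseq : pvRuns (v :: t)
          = (v, (t.takeWhile (· == v)).length + 1) :: pvRuns (t.dropWhile (· == v)) := by
        rw [pvRuns]
      have hpost_head : ∀ a, (t.dropWhile (· == v)).head? = some a → (a == v) = false :=
        fun a ha => pvHead?_dropWhile t a ha
      rw [hrunseq, List.flatMap_cons, ← List.append_assoc]
      conv_lhs => rw [hsplit, List.foldl_append]
      by_cases hv : pvIsBase v = true
      · have hbv : (b == some v) = false := hb v rfl hv
        obtain ⟨b', hfold, hne, _⟩ :=
          pvRunBase hv ((t.takeWhile (· == v)).length + 1) b false hbv acc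
        rw [hfold]
        have hb' : ∀ a, (t.dropWhile (· == v)).head? = some a → pvIsBase a = true →
            (b' == some a) = false := by
          intro a ha hba
          have hav : a ≠ v := by
            have := hpost_head a ha
            simpa [beq_iff_eq] using this
          have hb4 := pvIsBase_bounds hba
          have hv4 := pvIsBase_bounds hv
          rcases hne (by omega) with h' | h' <;> subst h' <;>
            simp only [beq_eq_false_iff_ne, ne_eq, Option.some.injEq] <;> omega
        rw [ih _ hpost_len b' hb' (acc ++ pvAlt v false ((t.takeWhile (· == v)).length + 1))]
        congr 2
        simp only [pvEmit, hv, if_true]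
        have := pvAlt_range v ((t.takeWhile (· == v)).length + 1) false
        simpa using this.symm
      · have hv' : pvIsBase v = false := by simpa using hv
        rw [pvRunNoBase hv' ((t.takeWhile (· == v)).length + 1) b acc]
        simp only [Nat.succ_ne_zero, if_false]
        have hb' : ∀ a, (t.dropWhile (· == v)).head? = some a → pvIsBase a = true →
            ((some v : Option Int) == some a) = false := by
          intro a ha _
          have hav : a ≠ v := by
            have := hpost_head a ha
            simpa [beq_iff_eq] using this
          simp only [beq_eq_false_iff_ne, ne_eq, Option.some.injEq]
          exact fun h => hav h.symm
        rw [ih _ hpost_len (some v) hb' (acc ++ List.replicate ((t.takeWhile (· == v)).length + 1) v)]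
        congr 2
        simp [pvEmit, hv']

lemma pv_foldl_map (f : List Int → List Int) :
    ∀ (l : List (List Int)) (acc : List (List Int)),
      List.foldl (fun yn y => yn ++ [f y]) acc l = acc ++ l.map f := by
  intro l
  induction l with
  | nil => simp
  | cons x t ih => intro acc; rw [List.foldl_cons, ih]; simp

-- ===== VERDICT (by name: the statement is the Claim_ definition above) =====
theorem to_flipflop_py_spec : Claim_equal_to_flipflop_py := by
  intro y_orig label_as_bases _ hpre
  have hfalse : label_as_bases = false := hpre
  subst hfalse
  unfold Spec_to_flipflop_py to_flipflop_py to_flipflop_py_alt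
  simp only [Bool.false_eq_true, if_false]
  rw [pv_foldl_map (fun y => (List.foldl pvStepA (none, []) y).2) y_orig []]
  simp only [List.nil_append]
  apply List.map_congr_left
  intro y _
  exact pvMain y.length y (Nat.le_refl _) none (by intro a _ _; simp) []
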